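-- pv_equiv track=rewrite | github.com/r4d10n/esp32p4-wifi-rtlsdr | test/host_dsp_reference.py | rds_bits_to_biphase_symbols
-- ===== SOURCE A (Python) =====
-- def rds_bits_to_biphase_symbols(bits):
--     """Convert data bits to differential biphase (Manchester) symbols.
--
--     Differential encoding: data '1' = no phase change, '0' = toggle.
--     Manchester: diff_bit 1 -> [+1, -1], diff_bit 0 -> [-1, +1].
--     """
--     symbols = []
--     prev_diff = 0
--     for bit in bits:
--         if bit == 1:
--             diff_bit = prev_diff  # no change
--         else:
--             diff_bit = 1 - prev_diff  # toggle
--         prev_diff = diff_bit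
--         if diff_bit == 1:
--             symbols.extend([1, -1])
--         else:
--             symbols.extend([-1, 1])
--     return symbols
-- ===== SOURCE B (Python) =====
-- def rds_bits_to_biphase_symbols(bits):
--     """Convert data bits to differential biphase (Manchester) symbols.
--
--     Staged pipeline: map bits to toggle flags, prefix-XOR-scan the flags
--     into the phase sequence, then flatten each phase to its Manchester pair.
--     """
--     toggles = [0 if bit == 1 else 1 for bit in bits]
--     phases = []
--     acc = 0
--     for t in toggles:
--         acc = (acc + t) % 2
--         phases.append(acc)
--     return [s for ph in phases for s in ([1, -1] if ph == 1 else [-1, 1])]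
-- ===== Notes on version B (the rewrite author's own statement) =====
-- stated objective: alternative
-- what changed: B replaces A's single interleaved state-machine loop with a staged pipeline: a map to toggle flags, a prefix-XOR scan producing the phase sequence, and a separate flatten pass emitting the Manchester pair per phase.
import Mathlib
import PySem

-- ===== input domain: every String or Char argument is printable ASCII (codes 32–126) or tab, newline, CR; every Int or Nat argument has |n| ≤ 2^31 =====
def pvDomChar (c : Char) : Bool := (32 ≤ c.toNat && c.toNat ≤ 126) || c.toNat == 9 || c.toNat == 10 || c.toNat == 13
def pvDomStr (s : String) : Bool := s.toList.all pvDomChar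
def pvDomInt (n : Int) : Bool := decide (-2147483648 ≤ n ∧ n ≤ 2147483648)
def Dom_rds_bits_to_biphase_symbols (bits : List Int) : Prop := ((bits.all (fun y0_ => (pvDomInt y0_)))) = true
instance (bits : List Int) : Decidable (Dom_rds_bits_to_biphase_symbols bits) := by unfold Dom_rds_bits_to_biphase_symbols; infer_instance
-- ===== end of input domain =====

-- B replaces A's interleaved state-machine loop with a staged pipeline (map toggles, prefix-parity scan, flatten); objective: alternative.


-- ===== PORT A =====
def rds_bits_to_biphase_symbols (bits : List Int) : List Int :=
  (bits.foldl (fun (st : List Int × Int) bit =>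
      let diff_bit : Int := if bit == 1 then st.2 else 1 - st.2
      (st.1 ++ (if diff_bit == 1 then [1, -1] else [-1, 1]), diff_bit))
    ([], 0)).1

-- ===== PORT B =====
def rds_bits_to_biphase_symbols_alt (bits : List Int) : List Int :=
  let toggles : List Int := bits.map (fun bit => if bit == 1 then 0 else 1)
  let phases : List Int :=
    (toggles.foldl (fun (st : Int × List Int) t =>
        (PySem.Int.mod (st.1 + t) 2, st.2 ++ [PySem.Int.mod (st.1 + t) 2])) (0, [])).2
  phases.flatMap (fun ph => if ph == 1 then [1, -1] else [-1, 1])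

-- ===== PRECONDITION & SPEC =====
def Spec_rds_bits_to_biphase_symbols (bits : List Int) (out : List Int) : Prop := out = rds_bits_to_biphase_symbols_alt bits
instance (bits : List Int) (out : List Int) : Decidable (Spec_rds_bits_to_biphase_symbols bits out) := by unfold Spec_rds_bits_to_biphase_symbols; infer_instance

-- ===== CLAIM (what is proved, stated in full; the proofs are below) =====
def Claim_equal_rds_bits_to_biphase_symbols : Prop := ∀ (bits : List Int), Dom_rds_bits_to_biphase_symbols bits → Spec_rds_bits_to_biphase_symbols bits (rds_bits_to_biphase_symbols bits)

-- ===== LEMMAS AND PROOFS =====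
-- the emitted list of B's scan only appends to the list component
theorem pv_scan_append (ts : List Int) (p : Int) (ps : List Int) :
    (ts.foldl (fun (st : Int × List Int) t =>
        (PySem.Int.mod (st.1 + t) 2, st.2 ++ [PySem.Int.mod (st.1 + t) 2])) (p, ps)).2 =
    ps ++ (ts.foldl (fun (st : Int × List Int) t =>
        (PySem.Int.mod (st.1 + t) 2, st.2 ++ [PySem.Int.mod (st.1 + t) 2])) (p, [])).2 := by
  induction ts generalizing p ps with
  | nil => simp
  | cons t ts ih =>
    simp only [List.foldl, List.nil_append]
    rw [ih, ih (PySem.Int.mod (p + t) 2) [PySem.Int.mod (p + t) 2]]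
    simp

-- Invariant: A's carried phase (always 0 or 1) equals B's running parity accumulator.
theorem pv_agree (bits : List Int) (acc : List Int) (prev : Int)
    (h : prev = 0 ∨ prev = 1) :
    (bits.foldl (fun (st : List Int × Int) bit =>
        (st.1 ++ (if (if bit == 1 then st.2 else 1 - st.2) == 1 then [1, -1] else [-1, 1]),
         if bit == 1 then st.2 else 1 - st.2))
      (acc, prev)).1 =
    acc ++ (((bits.map (fun bit => if bit == 1 then (0:Int) else 1)).foldl
        (fun (st : Int × List Int) t =>
          (PySem.Int.mod (st.1 + t) 2, st.2 ++ [PySem.Int.mod (st.1 + t) 2])) (prev, [])).2).flatMap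
      (fun ph => if ph == 1 then [1, -1] else [-1, 1]) := by
  induction bits generalizing acc prev with
  | nil => simp
  | cons b bs ih =>
    simp only [List.foldl, List.map, List.nil_append]
    by_cases hb : b = 1
    · subst hb
      have hdiff : PySem.Int.mod (prev + 0) 2 = prev := by
        rw [PySem.Int.mod_eq_emod_of_pos (by omega)]; omega
      simp only [beq_self_eq_true, if_true, hdiff]
      rw [pv_scan_append, ih (acc ++ (if prev == 1 then [1, -1] else [-1, 1])) prev h]
      simp
    · have hbf : (b == 1) = false := by simp [hb]
      have hdiff : PySem.Int.mod (prev + 1) 2 = 1 - prev := by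
        rw [PySem.Int.mod_eq_emod_of_pos (by omega)]; omega
      have h' : (1 - prev : Int) = 0 ∨ (1 - prev : Int) = 1 := by omega
      simp only [hbf, Bool.false_eq_true, if_false, hdiff]
      rw [pv_scan_append, ih (acc ++ (if (1 - prev : Int) == 1 then [1, -1] else [-1, 1])) (1 - prev) h']
      simp

-- ===== VERDICT (by name: the statement is the Claim_ definition above) =====
theorem rds_bits_to_biphase_symbols_spec : Claim_equal_rds_bits_to_biphase_symbols := by
  intro bits _
  unfold Spec_rds_bits_to_biphase_symbols rds_bits_to_biphase_symbols rds_bits_to_biphase_symbols_alt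
  exact pv_agree bits [] 0 (Or.inl rfl)
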